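-- pv_equiv track=rewrite | github.com/yaromochka/DSTU | PythonLang/MethodsOfProgramming/FourthTheme/Task 1 (1889)/main.py | min_meeting_steps
-- ===== SOURCE A (Python) =====
-- from collections import deque
--
-- MOVES = [(-2, -1), (-2, 1), (-1, -2), (-1, 2),
--          (1, -2), (1, 2), (2, -1), (2, 1)]
--
-- def bfs(start):
--     """Запускает BFS от заданной клетки и возвращает словарь минимальных расстояний."""
--     queue = deque([(start[0], start[1], 0)])  # (x, y, шаги)
--     visited = {start: 0}
--
--     while queue:
--         x, y, steps = queue.popleft()
--
--         for dx, dy in MOVES: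
--             nx, ny = x + dx, y + dy
--             if 0 <= nx < 8 and 0 <= ny < 8 and (nx, ny) not in visited:
--                 visited[(nx, ny)] = steps + 1
--                 queue.append((nx, ny, steps + 1))
--
--     return visited
--
-- def min_meeting_steps(start1, start2):
--     """Находит минимальное количество шагов, за которое оба коня могут оказаться на одной клетке."""
--     dist1 = bfs(start1)
--     dist2 = bfs(start2)
--
--     # Ищем минимальный шаг, на котором оба коня могут встретиться
--     min_steps = float('inf')
--
--     for pos in dist1:
--         if pos in dist2:
--             max_time = max(dist1[pos], dist2[pos])
--             if dist1[pos] == dist2[pos]:  # Должны попасть в одно время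
--                 min_steps = min(min_steps, max_time)
--
--     return min_steps if min_steps != float('inf') else -1
-- ===== SOURCE B (Python) =====
-- MOVES = [(-2, -1), (-2, 1), (-1, -2), (-1, 2),
--          (1, -2), (1, 2), (2, -1), (2, 1)]
--
-- def _expand(frontier, seen):
--     """One BFS level: cells at the next distance, not seen before."""
--     nxt = []
--     for x, y in frontier:
--         for dx, dy in MOVES:
--             nx, ny = x + dx, y + dy
--             if 0 <= nx < 8 and 0 <= ny < 8 and (nx, ny) not in seen:
--                 seen.add((nx, ny))
--                 nxt.append((nx, ny))
--     return nxt
--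
-- def min_meeting_steps(start1, start2):
--     """Lock-step level BFS from both starts; first level whose frontiers share a cell."""
--     f1, f2 = [start1], [start2]
--     seen1, seen2 = {start1}, {start2}
--     t = 0
--     while f1 and f2:
--         if set(f1) & set(f2):
--             return t
--         f1 = _expand(f1, seen1)
--         f2 = _expand(f2, seen2)
--         t += 1
--     return -1
-- ===== Notes on version B (the rewrite author's own statement) =====
-- stated objective: alternative
-- what changed: Instead of running two complete deque-based BFS traversals that build full distance dictionaries and then scanning one dictionary for cells with equal distances, B runs a single lock-step level-synchronized BFS keeping only the current frontier and visited set of each knight and returns the first level at which the two frontiers share a cell (early exit, no distance maps).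
import Mathlib
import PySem

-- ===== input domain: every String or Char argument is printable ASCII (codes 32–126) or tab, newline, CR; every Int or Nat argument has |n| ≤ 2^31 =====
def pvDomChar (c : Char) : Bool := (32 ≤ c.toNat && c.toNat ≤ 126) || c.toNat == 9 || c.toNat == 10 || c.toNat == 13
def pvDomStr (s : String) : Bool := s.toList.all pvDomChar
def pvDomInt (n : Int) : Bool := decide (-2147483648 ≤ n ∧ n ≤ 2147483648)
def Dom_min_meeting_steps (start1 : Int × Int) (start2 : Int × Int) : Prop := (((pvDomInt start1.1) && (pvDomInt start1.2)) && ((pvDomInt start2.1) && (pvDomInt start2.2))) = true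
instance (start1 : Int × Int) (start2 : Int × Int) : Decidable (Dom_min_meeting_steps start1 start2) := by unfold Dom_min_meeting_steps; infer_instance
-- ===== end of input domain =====

-- B replaces A's two complete deque BFS traversals (full distance dicts, then a scan for
-- equal distances) by one lock-step level-synchronized BFS that returns the first level at
-- which the two frontiers share a cell (objective: alternative algorithm, not timed faster).

-- ===== PORT A =====
def pvMOVES : List (Int × Int) := [(-2,-1),(-2,1),(-1,-2),(-1,2),(1,-2),(1,2),(2,-1),(2,1)]

-- Python's deque BFS loop; the fuel argument only makes the recursion total (the queue of a
-- run from `pvBfs` is exhausted long before the fuel is: proved in `pvChain_mem` below).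
def pvBfsLoop : Nat → List (Int × Int × Int) → PySem.Dict (Int × Int) Int → PySem.Dict (Int × Int) Int
  | _, [], visited => visited
  | 0, _ :: _, visited => visited
  | fuel+1, (x, y, steps) :: rest, visited =>
      let r := pvMOVES.foldl (fun (acc : List (Int × Int × Int) × PySem.Dict (Int × Int) Int) m =>
        let nx := x + m.1
        let ny := y + m.2
        if 0 ≤ nx ∧ nx < 8 ∧ 0 ≤ ny ∧ ny < 8 ∧ acc.2.contains (nx, ny) = false then
          (acc.1 ++ [(nx, ny, steps + 1)], acc.2.insert (nx, ny) (steps + 1))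
        else acc) (rest, visited)
      pvBfsLoop fuel r.1 r.2

def pvBfs (start : Int × Int) : PySem.Dict (Int × Int) Int :=
  pvBfsLoop 100000 [(start.1, start.2, 0)] (PySem.Dict.empty.insert start 0)

def min_meeting_steps (start1 : Int × Int) (start2 : Int × Int) : Int :=
  let dist1 := pvBfs start1
  let dist2 := pvBfs start2
  let min_steps : Option Int := dist1.keys.foldl (fun ms pos =>
    if dist2.contains pos = true then
      let max_time := max (dist1.getD pos 0) (dist2.getD pos 0)
      if dist1.getD pos 0 = dist2.getD pos 0 then
        some (match ms with | none => max_time | some m => min m max_time)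
      else ms
    else ms) none
  match min_steps with
  | some m => m
  | none => -1

-- ===== PORT B =====
def pvMOVESB : List (Int × Int) := [(-2,-1),(-2,1),(-1,-2),(-1,2),(1,-2),(1,2),(2,-1),(2,1)]

def pvExpand (frontier : List (Int × Int)) (seen : PySem.Set (Int × Int)) :
    List (Int × Int) × PySem.Set (Int × Int) :=
  frontier.foldl (fun acc p =>
    pvMOVESB.foldl (fun acc2 m =>
      let nx := p.1 + m.1
      let ny := p.2 + m.2
      if 0 ≤ nx ∧ nx < 8 ∧ 0 ≤ ny ∧ ny < 8 ∧ acc2.2.contains (nx, ny) = false then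
        (acc2.1 ++ [(nx, ny)], PySem.Set.add acc2.2 (nx, ny))
      else acc2) acc) ([], seen)

-- Source B's `while f1 and f2` loop; fuel only makes it total (a run from
-- `min_meeting_steps_alt` stops long before: proved in `pvAltLoop_eq` below).
def pvAltLoop : Nat → List (Int × Int) → List (Int × Int) → PySem.Set (Int × Int) →
    PySem.Set (Int × Int) → Int → Int
  | 0, _, _, _, _, _ => -1
  | fuel+1, f1, f2, seen1, seen2, t =>
      if f1 = [] ∨ f2 = [] then -1
      else if PySem.Set.inter (PySem.Set.ofList f1) (PySem.Set.ofList f2) ≠ [] then t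
      else
        let e1 := pvExpand f1 seen1
        let e2 := pvExpand f2 seen2
        pvAltLoop fuel e1.1 e2.1 e1.2 e2.2 (t + 1)

def min_meeting_steps_alt (start1 : Int × Int) (start2 : Int × Int) : Int :=
  pvAltLoop 100000 [start1] [start2] (PySem.Set.ofList [start1]) (PySem.Set.ofList [start2]) 0

-- ===== PRECONDITION & SPEC =====
def Spec_min_meeting_steps (start1 : Int × Int) (start2 : Int × Int) (out : Int) : Prop := out = min_meeting_steps_alt start1 start2
instance (start1 : Int × Int) (start2 : Int × Int) (out : Int) : Decidable (Spec_min_meeting_steps start1 start2 out) := by unfold Spec_min_meeting_steps; infer_instance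

-- ===== CLAIM (what is proved, stated in full; the proofs are below) =====
def Claim_equal_min_meeting_steps : Prop := ∀ (start1 : Int × Int) (start2 : Int × Int), Dom_min_meeting_steps start1 start2 → Spec_min_meeting_steps start1 start2 (min_meeting_steps start1 start2)

-- ===== LEMMAS AND PROOFS =====

-- Ghost level-BFS: one move-step on an accumulator (new cells found so far, all cells seen so far)
def pvGstep (p : Int × Int) (acc : List (Int × Int) × List (Int × Int)) (m : Int × Int) :
    List (Int × Int) × List (Int × Int) :=
  if 0 ≤ p.1 + m.1 ∧ p.1 + m.1 < 8 ∧ 0 ≤ p.2 + m.2 ∧ p.2 + m.2 < 8 ∧ (p.1 + m.1, p.2 + m.2) ∉ acc.2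
  then (acc.1 ++ [(p.1 + m.1, p.2 + m.2)], acc.2 ++ [(p.1 + m.1, p.2 + m.2)]) else acc

-- expanding a whole frontier F against seen-list K
def pvLevel (F K : List (Int × Int)) : List (Int × Int) × List (Int × Int) :=
  F.foldl (fun acc p => pvMOVES.foldl (pvGstep p) acc) ([], K)

-- frontier / seen-set sequence of the BFS from s0
def pvLK (s0 : Int × Int) : Nat → List (Int × Int) × List (Int × Int)
  | 0 => ([s0], [s0])
  | t+1 => pvLevel (pvLK s0 t).1 (pvLK s0 t).2

def pvL (s0 : Int × Int) (t : Nat) : List (Int × Int) := (pvLK s0 t).1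
def pvK (s0 : Int × Int) (t : Nat) : List (Int × Int) := (pvLK s0 t).2

abbrev pvMeet (s1 s2 : Int × Int) (u : Nat) : Prop := ∃ c ∈ pvL s1 u, c ∈ pvL s2 u

-- the (cell, distance) items that A's deque loop appends, pop by pop
def pvChain : Nat → List (Int × Int) → List (Int × Int) → List (Int × Int) → Int →
    List ((Int × Int) × Int)
  | 0, _, _, _, _ => []
  | _+1, [], [], _, _ => []
  | fuel+1, [], c :: N, K, s => pvChain (fuel+1) (c :: N) [] K (s+1)
  | fuel+1, p :: F, N, K, s =>
      let g := pvMOVES.foldl (pvGstep p) ([], K)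
      g.1.map (fun c => (c, s+1)) ++ pvChain fuel F (N ++ g.1) (K ++ g.1) s
  termination_by fuel F _ _ _ => 2 * fuel + (if F.isEmpty then 1 else 0)
  decreasing_by all_goals (simp only [List.isEmpty_cons, List.isEmpty_nil, reduceIte]; (try split)) <;> simp_all <;> omega

-- generic fold invariance
theorem pvFoldlInv {α β : Type} {P : α → Prop} {f : α → β → α}
    (h : ∀ a x, P a → P (f a x)) : ∀ (l : List β) (a : α), P a → P (l.foldl f a) := by
  intro l
  induction l with
  | nil => intro a ha; exact ha
  | cons x xs ih => intro a ha; exact ih _ (h a x ha)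

-- pvGstep folds: first component is append-homomorphic, second does not depend on it
theorem pvGstep_happ (p : Int × Int) : ∀ (ms : List (Int × Int)) (a K : List (Int × Int)),
    ms.foldl (pvGstep p) (a, K) =
      (a ++ (ms.foldl (pvGstep p) ([], K)).1, (ms.foldl (pvGstep p) ([], K)).2) := by
  intro ms
  induction ms with
  | nil => intro a K; simp
  | cons m ms ih =>
    intro a K
    simp only [List.foldl_cons, pvGstep]
    by_cases h : 0 ≤ p.1 + m.1 ∧ p.1 + m.1 < 8 ∧ 0 ≤ p.2 + m.2 ∧ p.2 + m.2 < 8 ∧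
        (p.1 + m.1, p.2 + m.2) ∉ K
    · simp only [if_pos h]
      rw [ih (a ++ [(p.1 + m.1, p.2 + m.2)]) (K ++ [(p.1 + m.1, p.2 + m.2)]),
          ih ([] ++ [(p.1 + m.1, p.2 + m.2)]) (K ++ [(p.1 + m.1, p.2 + m.2)])]
      simp
    · simp only [if_neg h]
      exact ih a K

theorem pvLevel_happ : ∀ (F : List (Int × Int)) (a K : List (Int × Int)),
    F.foldl (fun acc p => pvMOVES.foldl (pvGstep p) acc) (a, K) =
      (a ++ (pvLevel F K).1, (pvLevel F K).2) := by
  intro F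
  induction F with
  | nil => intro a K; simp [pvLevel]
  | cons p F ih =>
    intro a K
    have h1 : pvLevel (p :: F) K
        = F.foldl (fun acc p => pvMOVES.foldl (pvGstep p) acc)
            (pvMOVES.foldl (pvGstep p) ([], K)) := rfl
    simp only [List.foldl_cons]
    rw [pvGstep_happ p pvMOVES a K]
    rcases hg : pvMOVES.foldl (pvGstep p) ([], K) with ⟨g1, g2⟩
    rw [ih (a ++ g1) g2, h1, hg, ih g1 g2]
    simp

-- basic invariants of a level expansion
theorem pvLevel_snd (F K : List (Int × Int)) :
    (pvLevel F K).2 = K ++ (pvLevel F K).1 := by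
  have hinv := pvFoldlInv (P := fun acc : List (Int × Int) × List (Int × Int) =>
      acc.2 = K ++ acc.1)
    (f := fun acc p => pvMOVES.foldl (pvGstep p) acc)
    (by
      intro a p ha
      refine pvFoldlInv (P := fun acc : List (Int × Int) × List (Int × Int) =>
        acc.2 = K ++ acc.1) (f := pvGstep p) ?_ pvMOVES a ha
      intro a m ha
      simp only [pvGstep]
      split
      · simp [ha]
      · exact ha) F ([], K) (by simp)
  exact hinv

theorem pvLevel_inv (F K : List (Int × Int)) (hK : K.Nodup) :
    (K ++ (pvLevel F K).1).Nodup ∧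
      ∀ c ∈ (pvLevel F K).1, (0 ≤ c.1 ∧ c.1 < 8 ∧ 0 ≤ c.2 ∧ c.2 < 8) := by
  have hinv := pvFoldlInv (P := fun acc : List (Int × Int) × List (Int × Int) =>
      acc.2 = K ++ acc.1 ∧ acc.2.Nodup ∧ ∀ c ∈ acc.1, (0 ≤ c.1 ∧ c.1 < 8 ∧ 0 ≤ c.2 ∧ c.2 < 8))
    (f := fun acc p => pvMOVES.foldl (pvGstep p) acc)
    (by
      intro a p ha
      refine pvFoldlInv (P := fun acc : List (Int × Int) × List (Int × Int) =>
        acc.2 = K ++ acc.1 ∧ acc.2.Nodup ∧ ∀ c ∈ acc.1, (0 ≤ c.1 ∧ c.1 < 8 ∧ 0 ≤ c.2 ∧ c.2 < 8))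
        (f := pvGstep p) ?_ pvMOVES a ha
      intro a m ha
      obtain ⟨h1, h2, h3⟩ := ha
      simp only [pvGstep]
      split
      · rename_i hcond
        refine ⟨by simp [h1], ?_, ?_⟩
        · rw [List.nodup_append]
          refine ⟨h2, List.nodup_singleton _, ?_⟩
          intro x hx y hy
          have hye := List.mem_singleton.mp hy
          subst hye
          intro hxy
          subst hxy
          exact hcond.2.2.2.2 hx
        · intro c hc
          rcases List.mem_append.mp hc with hc | hc
          · exact h3 c hc
          · simp at hc
            subst hc
            exact ⟨hcond.1, hcond.2.1, hcond.2.2.1, hcond.2.2.2.1⟩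
      · exact ⟨h1, h2, h3⟩) F ([], K) (by simpa using hK)
  obtain ⟨h1, h2, h3⟩ := hinv
  exact ⟨h1 ▸ h2, h3⟩

theorem pvLevel_nil (K : List (Int × Int)) : pvLevel [] K = ([], K) := rfl

-- L/K sequence facts
theorem pvK_nodup (s0 : Int × Int) : ∀ t, (pvK s0 t).Nodup ∧
    (∀ c ∈ pvK s0 t, c = s0 ∨ (0 ≤ c.1 ∧ c.1 < 8 ∧ 0 ≤ c.2 ∧ c.2 < 8)) ∧
    (∀ c ∈ pvL s0 t, c ∈ pvK s0 t) := by
  intro t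
  induction t with
  | zero => simp [pvK, pvL, pvLK]
  | succ t ih =>
    obtain ⟨h1, h2, h3⟩ := ih
    have hK1 : pvK s0 (t+1) = (pvLevel (pvL s0 t) (pvK s0 t)).2 := rfl
    have hL1 : pvL s0 (t+1) = (pvLevel (pvL s0 t) (pvK s0 t)).1 := rfl
    have hsnd := pvLevel_snd (pvL s0 t) (pvK s0 t)
    have hinv := pvLevel_inv (pvL s0 t) (pvK s0 t) h1
    refine ⟨?_, ?_, ?_⟩
    · rw [hK1, hsnd]; exact hinv.1
    · intro c hc
      rw [hK1, hsnd] at hc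
      rcases List.mem_append.mp hc with hc | hc
      · exact h2 c hc
      · exact Or.inr (hinv.2 c hc)
    · intro c hc
      rw [hK1, hsnd]
      rw [hL1] at hc
      exact List.mem_append.mpr (Or.inr hc)

theorem pvK_succ (s0 : Int × Int) (t : Nat) :
    pvK s0 (t+1) = pvK s0 t ++ pvL s0 (t+1) := by
  exact pvLevel_snd (pvL s0 t) (pvK s0 t)

theorem pvL_empty_ge (s0 : Int × Int) {t : Nat} (h : pvL s0 t = []) :
    ∀ u, t ≤ u → pvL s0 u = [] := by
  intro u hu
  induction u with
  | zero => cases Nat.le_zero.mp hu; exact h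
  | succ u ih =>
    rcases Nat.lt_or_ge t (u+1) with hlt | hge
    · have hu' : pvL s0 u = [] := ih (Nat.lt_succ_iff.mp hlt)
      have : pvL s0 (u+1) = (pvLevel (pvL s0 u) (pvK s0 u)).1 := rfl
      rw [this, hu', pvLevel_nil]
    · cases Nat.le_antisymm hu hge; exact h

theorem pvK_length_le (s0 : Int × Int) (t : Nat) : (pvK s0 t).length ≤ 65 := by
  classical
  set A : Finset (Int × Int) :=
    insert s0 ((Finset.Icc (0:Int) 7) ×ˢ (Finset.Icc (0:Int) 7)) with hA
  have hsub : (pvK s0 t).toFinset ⊆ A := by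
    intro c hc
    rw [List.mem_toFinset] at hc
    rcases (pvK_nodup s0 t).2.1 c hc with h | h
    · simp [hA, h]
    · simp only [hA, Finset.mem_insert, Finset.mem_product, Finset.mem_Icc]
      exact Or.inr ⟨⟨h.1, by omega⟩, ⟨h.2.2.1, by omega⟩⟩
  have hcardA : A.card ≤ 65 := by
    have h1 : ((Finset.Icc (0:Int) 7) ×ˢ (Finset.Icc (0:Int) 7)).card = 64 := by
      rw [Finset.card_product]
      simp [Int.card_Icc]
    calc A.card ≤ ((Finset.Icc (0:Int) 7) ×ˢ (Finset.Icc (0:Int) 7)).card + 1 :=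
          Finset.card_insert_le _ _
      _ ≤ 65 := by omega
  have hlen : (pvK s0 t).toFinset.card = (pvK s0 t).length :=
    List.toFinset_card_of_nodup (pvK_nodup s0 t).1
  calc (pvK s0 t).length = (pvK s0 t).toFinset.card := hlen.symm
    _ ≤ A.card := Finset.card_le_card hsub
    _ ≤ 65 := hcardA

theorem pvK_length_lower (s0 : Int × Int) :
    ∀ t, (∀ u, u ≤ t → pvL s0 u ≠ []) → t + 1 ≤ (pvK s0 t).length := by
  intro t
  induction t with
  | zero => intro _; simp [pvK, pvLK]
  | succ t ih =>
    intro h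
    have h1 : t + 1 ≤ (pvK s0 t).length := ih (fun u hu => h u (Nat.le_succ_of_le hu))
    have h2 : pvL s0 (t+1) ≠ [] := h (t+1) (Nat.le_refl _)
    have h3 : 1 ≤ (pvL s0 (t+1)).length := List.length_pos_iff.mpr h2
    rw [pvK_succ, List.length_append]
    omega

theorem pvT_le (s0 : Int × Int) (t : Nat) (h : ∀ u, u < t → pvL s0 u ≠ []) : t ≤ 65 := by
  cases t with
  | zero => omega
  | succ v =>
    have h1 : v + 1 ≤ (pvK s0 v).length :=
      pvK_length_lower s0 v (fun u hu => h u (by omega))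
    have h2 := pvK_length_le s0 v
    omega

-- ===== A-side: deque BFS = level BFS =====

theorem pvBfsLoop_zero (q : List (Int × Int × Int)) (d : PySem.Dict (Int × Int) Int) :
    pvBfsLoop 0 q d = d := by
  cases q <;> rfl

theorem pvInnerA (x y : Int) (s : Int) :
    ∀ (ms : List (Int × Int)) (q : List (Int × Int × Int)) (d : PySem.Dict (Int × Int) Int),
    d.keys.Nodup →
    ms.foldl (fun (acc : List (Int × Int × Int) × PySem.Dict (Int × Int) Int) m =>
        if 0 ≤ x + m.1 ∧ x + m.1 < 8 ∧ 0 ≤ y + m.2 ∧ y + m.2 < 8 ∧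
            acc.2.contains (x + m.1, y + m.2) = false then
          (acc.1 ++ [(x + m.1, y + m.2, s + 1)], acc.2.insert (x + m.1, y + m.2) (s + 1))
        else acc) (q, d)
      = (q ++ (ms.foldl (pvGstep (x, y)) ([], d.keys)).1.map (fun c => (c.1, c.2, s + 1)),
         PySem.Dict.mk (d.items ++ (ms.foldl (pvGstep (x, y)) ([], d.keys)).1.map (fun c => (c, s + 1)))) := by
  intro ms
  induction ms with
  | nil => intro q d hnd; simp
  | cons m ms ih =>
    intro q d hnd
    simp only [List.foldl_cons]
    by_cases h : 0 ≤ x + m.1 ∧ x + m.1 < 8 ∧ 0 ≤ y + m.2 ∧ y + m.2 < 8 ∧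
        (x + m.1, y + m.2) ∉ d.keys
    · have hcf : d.contains (x + m.1, y + m.2) = false := by
        rw [PySem.Dict.contains_eq_decide_mem_keys]
        exact decide_eq_false h.2.2.2.2
      rw [if_pos ⟨h.1, h.2.1, h.2.2.1, h.2.2.2.1, hcf⟩]
      have hkeys : (d.insert (x + m.1, y + m.2) (s + 1)).keys
          = d.keys ++ [(x + m.1, y + m.2)] := by
        rw [PySem.Dict.keys_insert_of_not_contains _ _ hcf]
      have hitems : (d.insert (x + m.1, y + m.2) (s + 1)).items
          = d.items ++ [((x + m.1, y + m.2), s + 1)] := by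
        rw [PySem.Dict.items_insert_of_not_contains _ _ hcf]
      have hnd' : (d.insert (x + m.1, y + m.2) (s + 1)).keys.Nodup := by
        rw [hkeys, List.nodup_append]
        refine ⟨hnd, List.nodup_singleton _, ?_⟩
        intro a ha b hb hab
        have := List.mem_singleton.mp hb
        subst this; subst hab
        exact h.2.2.2.2 ha
      rw [ih (q ++ [(x + m.1, y + m.2, s + 1)]) _ hnd']
      have hg : pvGstep (x, y) ([], d.keys) m
          = ([(x + m.1, y + m.2)], d.keys ++ [(x + m.1, y + m.2)]) := by
        simp only [pvGstep]
        rw [if_pos (by simpa using h)]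
        simp
      rw [hkeys, hitems, hg,
        pvGstep_happ (x, y) ms [(x + m.1, y + m.2)] (d.keys ++ [(x + m.1, y + m.2)])]
      simp
    · have hct : ¬ (0 ≤ x + m.1 ∧ x + m.1 < 8 ∧ 0 ≤ y + m.2 ∧ y + m.2 < 8 ∧
          d.contains (x + m.1, y + m.2) = false) := by
        intro hc
        apply h
        refine ⟨hc.1, hc.2.1, hc.2.2.1, hc.2.2.2.1, ?_⟩
        have := hc.2.2.2.2
        rw [PySem.Dict.contains_eq_decide_mem_keys] at this
        exact of_decide_eq_false this
      rw [if_neg hct]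
      have hg : pvGstep (x, y) ([], d.keys) m = ([], d.keys) := by
        simp only [pvGstep]
        rw [if_neg (by simpa using h)]
      rw [ih q d hnd, hg]

theorem pvBfsLoop_chain : ∀ (fuel : Nat) (F N K : List (Int × Int)) (s : Int)
    (d : PySem.Dict (Int × Int) Int), d.keys = K → K.Nodup →
    (pvBfsLoop fuel (F.map (fun c => (c.1, c.2, s)) ++ N.map (fun c => (c.1, c.2, s+1))) d).items
      = d.items ++ pvChain fuel F N K s := by
  intro fuel F N K s
  induction fuel, F, N, K, s using pvChain.induct with
  | case1 F N K s =>
    intro d hK hnd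
    rw [pvBfsLoop_zero]
    simp [pvChain]
  | case2 fuel K s =>
    intro d hK hnd
    simp [pvBfsLoop, pvChain]
  | case3 fuel c N K s ih =>
    intro d hK hnd
    have hq : ([] : List (Int × Int)).map (fun c => (c.1, c.2, s)) ++
        (c :: N).map (fun c => (c.1, c.2, s+1))
        = (c :: N).map (fun c => (c.1, c.2, s+1)) ++
          ([] : List (Int × Int)).map (fun c => (c.1, c.2, s+1+1)) := by simp
    rw [hq, ih d hK hnd]
    conv_rhs => rw [pvChain]
  | case4 fuel p F N K s g ih =>
    intro d hK hnd
    rw [show g = List.foldl (pvGstep p) ([], K) pvMOVES from rfl] at ih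
    have hq : ((p :: F).map (fun c => (c.1, c.2, s)) ++ N.map (fun c => (c.1, c.2, s+1)))
        = (p.1, p.2, s) :: (F.map (fun c => (c.1, c.2, s)) ++ N.map (fun c => (c.1, c.2, s+1))) := by
      simp
    rw [hq]
    show (pvBfsLoop fuel _ _).items = _
    rw [pvInnerA p.1 p.2 s pvMOVES
      (F.map (fun c => (c.1, c.2, s)) ++ N.map (fun c => (c.1, c.2, s+1))) d (hK ▸ hnd)]
    have hpe : ((p.1 : Int), (p.2 : Int)) = p := rfl
    rw [hK, hpe]
    have hnodup' : (K ++ (pvMOVES.foldl (pvGstep p) ([], K)).1).Nodup := by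
      have : pvLevel [p] K = pvMOVES.foldl (pvGstep p) ([], K) := by
        simp [pvLevel]
      exact this ▸ (pvLevel_inv [p] K hnd).1
    have hkeys' : (PySem.Dict.mk (d.items ++
        (pvMOVES.foldl (pvGstep p) ([], K)).1.map (fun c => (c, s + 1)))).keys
        = K ++ (pvMOVES.foldl (pvGstep p) ([], K)).1 := by
      simp only [PySem.Dict.keys]
      rw [← hK]
      simp only [PySem.Dict.keys, List.map_append, List.map_map]
      have hid : ((fun x : (Int × Int) × Int => x.1) ∘ fun c : Int × Int => (c, s + 1))
          = fun c : Int × Int => c := by funext c; rfl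
      rw [hid, List.map_id']
    have hq2 : F.map (fun c => (c.1, c.2, s)) ++ N.map (fun c => (c.1, c.2, s+1)) ++
        (pvMOVES.foldl (pvGstep p) ([], K)).1.map (fun c => (c.1, c.2, s + 1))
        = F.map (fun c => (c.1, c.2, s)) ++
          (N ++ (pvMOVES.foldl (pvGstep p) ([], K)).1).map (fun c => (c.1, c.2, s+1)) := by
      simp
    rw [hq2, ih _ hkeys' hnodup']
    simp [pvChain]

theorem pvChain_pops : ∀ (F : List (Int × Int)) (fuel : Nat) (N K : List (Int × Int)) (s : Int),
    F.length ≤ fuel →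
    pvChain fuel F N K s =
      (pvLevel F K).1.map (fun c => (c, s+1)) ++
        pvChain (fuel - F.length) (N ++ (pvLevel F K).1) [] (K ++ (pvLevel F K).1) (s+1) := by
  intro F
  induction F with
  | nil =>
    intro fuel N K s hf
    rw [pvLevel_nil]
    cases N with
    | nil =>
      cases fuel with
      | zero => simp [pvChain]
      | succ fuel => simp [pvChain]
    | cons c N =>
      cases fuel with
      | zero => simp [pvChain]
      | succ fuel =>
        simp only [List.map_nil, List.nil_append, List.append_nil, List.length_nil, Nat.sub_zero]
        conv_lhs => rw [pvChain]
  | cons p F ih =>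
    intro fuel N K s hf
    cases fuel with
    | zero => simp at hf
    | succ fuel =>
      have h1 : pvChain (fuel+1) (p :: F) N K s
          = (pvMOVES.foldl (pvGstep p) ([], K)).1.map (fun c => (c, s+1)) ++
            pvChain fuel F (N ++ (pvMOVES.foldl (pvGstep p) ([], K)).1)
              (K ++ (pvMOVES.foldl (pvGstep p) ([], K)).1) s := by
        conv_lhs => rw [pvChain]
      rw [h1, ih fuel _ _ s (by simpa using hf)]
      have hlev : pvLevel (p :: F) K
          = ((pvMOVES.foldl (pvGstep p) ([], K)).1 ++
              (pvLevel F (K ++ (pvMOVES.foldl (pvGstep p) ([], K)).1)).1,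
             (pvLevel F (K ++ (pvMOVES.foldl (pvGstep p) ([], K)).1)).2) := by
        have h2 : pvLevel (p :: F) K
            = F.foldl (fun acc p => pvMOVES.foldl (pvGstep p) acc)
                (pvMOVES.foldl (pvGstep p) ([], K)) := rfl
        have h3 := pvGstep_happ p pvMOVES [] K
        rcases hg : pvMOVES.foldl (pvGstep p) ([], K) with ⟨g1, g2⟩
        have hg2 : g2 = K ++ g1 := by
          have h4 : pvLevel [p] K = pvMOVES.foldl (pvGstep p) ([], K) := by simp [pvLevel]
          have := pvLevel_snd [p] K
          rw [h4, hg] at this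
          exact this
        rw [h2, hg, hg2, pvLevel_happ F g1 (K ++ g1)]
      have hsub : fuel + 1 - (p :: F).length = fuel - F.length := by simp
      rw [hlev, hsub]
      simp [List.append_assoc]

theorem pvChain_nil : ∀ (fuel : Nat) (K : List (Int × Int)) (s : Int),
    pvChain fuel [] [] K s = [] := by
  intro fuel K s
  cases fuel <;> simp [pvChain]

theorem pvChain_level_empty (s0 : Int × Int) (t fuel : Nat)
    (hfuel : (pvL s0 t).length ≤ fuel) (hL : pvL s0 (t+1) = []) :
    pvChain fuel (pvL s0 t) [] (pvK s0 t) (t : Int) = [] := by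
  rw [pvChain_pops _ _ _ _ _ hfuel]
  have e1 : (pvLevel (pvL s0 t) (pvK s0 t)).1 = pvL s0 (t+1) := rfl
  rw [e1, hL]
  simp [pvChain_nil]

theorem pvChain_mem (s0 : Int × Int) : ∀ (n t fuel : Nat),
    65 - (pvK s0 t).length ≤ n →
    (pvL s0 t).length + (65 - (pvK s0 t).length) ≤ fuel →
    ∀ c v, ((c, v) ∈ pvChain fuel (pvL s0 t) [] (pvK s0 t) (t : Int) ↔
      ∃ u : Nat, t < u ∧ c ∈ pvL s0 u ∧ v = (u : Int)) := by
  intro n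
  induction n with
  | zero =>
    intro t fuel h1 h2 c v
    by_cases hL : pvL s0 (t+1) = []
    · rw [pvChain_level_empty s0 t fuel (by omega) hL]
      simp only [List.not_mem_nil, false_iff]
      rintro ⟨u, hu1, hu2, hu3⟩
      rw [pvL_empty_ge s0 hL u (by omega)] at hu2
      simp at hu2
    · exfalso
      have hK65 := pvK_length_le s0 (t+1)
      have hKlen : (pvK s0 (t+1)).length = (pvK s0 t).length + (pvL s0 (t+1)).length := by
        rw [pvK_succ, List.length_append]
      have hLpos : 1 ≤ (pvL s0 (t+1)).length := List.length_pos_iff.mpr hL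
      omega
  | succ n ih =>
    intro t fuel h1 h2 c v
    by_cases hL : pvL s0 (t+1) = []
    · rw [pvChain_level_empty s0 t fuel (by omega) hL]
      simp only [List.not_mem_nil, false_iff]
      rintro ⟨u, hu1, hu2, hu3⟩
      rw [pvL_empty_ge s0 hL u (by omega)] at hu2
      simp at hu2
    · have hK65 := pvK_length_le s0 (t+1)
      have hKlen : (pvK s0 (t+1)).length = (pvK s0 t).length + (pvL s0 (t+1)).length := by
        rw [pvK_succ, List.length_append]
      have hLpos : 1 ≤ (pvL s0 (t+1)).length := List.length_pos_iff.mpr hL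
      rw [pvChain_pops _ _ _ _ _ (by omega)]
      have e1 : (pvLevel (pvL s0 t) (pvK s0 t)).1 = pvL s0 (t+1) := rfl
      have e2 : (pvLevel (pvL s0 t) (pvK s0 t)).2 = pvK s0 (t+1) := rfl
      rw [e1]
      have e3 : pvK s0 t ++ pvL s0 (t+1) = pvK s0 (t+1) := (pvK_succ s0 t).symm
      rw [e3]
      have hcast : (t : Int) + 1 = ((t+1 : Nat) : Int) := by push_cast; ring
      rw [hcast]
      simp only [List.nil_append]
      rw [List.mem_append, ih (t+1) (fuel - (pvL s0 t).length) (by omega) (by omega) c v]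
      constructor
      · rintro (hm | ⟨u, hu1, hu2, hu3⟩)
        · obtain ⟨a, ha, heq⟩ := List.mem_map.mp hm
          cases heq
          exact ⟨t+1, by omega, ha, rfl⟩
        · exact ⟨u, by omega, hu2, hu3⟩
      · rintro ⟨u, hu1, hu2, hu3⟩
        rcases Nat.lt_or_ge (t+1) u with h | h
        · right; exact ⟨u, h, hu2, hu3⟩
        · have hue : u = t+1 := by omega
          subst hue
          left
          exact List.mem_map.mpr ⟨c, hu2, by rw [hu3]⟩

theorem pvBfs_items (s0 : Int × Int) :
    (pvBfs s0).items = (s0, 0) :: pvChain 100000 [s0] [] [s0] 0 := by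
  have hcf : (PySem.Dict.empty : PySem.Dict (Int × Int) Int).contains s0 = false := by
    simp [pysem]
  have hit : ((PySem.Dict.empty : PySem.Dict (Int × Int) Int).insert s0 0).items
      = [(s0, (0 : Int))] := by
    rw [PySem.Dict.items_insert_of_not_contains _ _ hcf]
    rfl
  have hk : ((PySem.Dict.empty : PySem.Dict (Int × Int) Int).insert s0 0).keys = [s0] := by
    rw [PySem.Dict.keys_insert_of_not_contains _ _ hcf]
    rfl
  have hq : [((s0.1 : Int), (s0.2 : Int), (0 : Int))]
      = [s0].map (fun c => (c.1, c.2, (0 : Int))) ++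
        ([] : List (Int × Int)).map (fun c => (c.1, c.2, (0 : Int) + 1)) := by simp
  show (pvBfsLoop 100000 [(s0.1, s0.2, 0)] (PySem.Dict.empty.insert s0 0)).items = _
  rw [hq, pvBfsLoop_chain 100000 [s0] [] [s0] 0 _ hk (List.nodup_singleton s0), hit]
  rfl

theorem pvBfs_mem_items (s0 : Int × Int) (c : Int × Int) (v : Int) :
    (c, v) ∈ (pvBfs s0).items ↔ ∃ u : Nat, c ∈ pvL s0 u ∧ v = (u : Int) := by
  rw [pvBfs_items]
  have hmem := pvChain_mem s0 64 0 100000 (by simp [pvK, pvLK]) (by simp [pvL, pvK, pvLK]) c v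
  have e1 : pvL s0 0 = [s0] := rfl
  have e2 : pvK s0 0 = [s0] := rfl
  rw [e1, e2] at hmem
  have e3 : ((0 : Nat) : Int) = (0 : Int) := rfl
  rw [e3] at hmem
  constructor
  · intro h
    rcases List.mem_cons.mp h with h | h
    · cases h
      exact ⟨0, by simp [pvL, pvLK], rfl⟩
    · obtain ⟨u, hu1, hu2, hu3⟩ := hmem.mp h
      exact ⟨u, hu2, hu3⟩
  · rintro ⟨u, hu1, hu2⟩
    cases u with
    | zero =>
      have : c = s0 := by simpa [pvL, pvLK] using hu1
      subst this
      subst hu2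
      exact List.mem_cons_self
    | succ u =>
      exact List.mem_cons.mpr (Or.inr (hmem.mpr ⟨u+1, by omega, hu1, hu2⟩))

theorem pvBfs_keys_nodup (s0 : Int × Int) : (pvBfs s0).keys.Nodup := by
  have main : ∀ (fuel : Nat) (q : List (Int × Int × Int)) (d : PySem.Dict (Int × Int) Int),
      d.keys.Nodup → (pvBfsLoop fuel q d).keys.Nodup := by
    intro fuel
    induction fuel with
    | zero => intro q d h; rw [pvBfsLoop_zero]; exact h
    | succ fuel ih =>
      intro q d h
      cases q with
      | nil => exact h
      | cons e rest =>
        rcases e with ⟨x, y, st⟩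
        rw [show pvBfsLoop (fuel+1) ((x, y, st) :: rest) d
            = pvBfsLoop fuel
                (pvMOVES.foldl (fun (acc : List (Int × Int × Int) × PySem.Dict (Int × Int) Int) m =>
                  if 0 ≤ x + m.1 ∧ x + m.1 < 8 ∧ 0 ≤ y + m.2 ∧ y + m.2 < 8 ∧
                      acc.2.contains (x + m.1, y + m.2) = false then
                    (acc.1 ++ [(x + m.1, y + m.2, st + 1)], acc.2.insert (x + m.1, y + m.2) (st + 1))
                  else acc) (rest, d)).1
                (pvMOVES.foldl (fun (acc : List (Int × Int × Int) × PySem.Dict (Int × Int) Int) m =>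
                  if 0 ≤ x + m.1 ∧ x + m.1 < 8 ∧ 0 ≤ y + m.2 ∧ y + m.2 < 8 ∧
                      acc.2.contains (x + m.1, y + m.2) = false then
                    (acc.1 ++ [(x + m.1, y + m.2, st + 1)], acc.2.insert (x + m.1, y + m.2) (st + 1))
                  else acc) (rest, d)).2 from rfl]
        refine ih _ _ ?_
        refine pvFoldlInv (P := fun acc : List (Int × Int × Int) × PySem.Dict (Int × Int) Int =>
          acc.2.keys.Nodup) ?_ pvMOVES (rest, d) h
        intro a m ha
        by_cases hc : 0 ≤ x + m.1 ∧ x + m.1 < 8 ∧ 0 ≤ y + m.2 ∧ y + m.2 < 8 ∧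
            a.2.contains (x + m.1, y + m.2) = false
        · rw [if_pos hc]
          show (a.2.insert (x + m.1, y + m.2) (st + 1)).keys.Nodup
          rw [PySem.Dict.keys_insert_of_not_contains _ _ hc.2.2.2.2, List.nodup_append]
          refine ⟨ha, List.nodup_singleton _, ?_⟩
          intro w hw w2 hw2 hww
          have hw2e := List.mem_singleton.mp hw2
          rw [hww, hw2e] at hw
          rw [← PySem.Dict.contains_iff_mem_keys] at hw
          have hfalse := hc.2.2.2.2
          rw [hw] at hfalse
          exact Bool.noConfusion hfalse
        · rw [if_neg hc]
          exact ha
  refine main _ _ _ ?_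
  have hcf : (PySem.Dict.empty : PySem.Dict (Int × Int) Int).contains s0 = false := by
    simp [pysem]
  rw [PySem.Dict.keys_insert_of_not_contains _ _ hcf]
  simp [pysem]

theorem pvBfs_mem_keys (s0 : Int × Int) (c : Int × Int) :
    c ∈ (pvBfs s0).keys ↔ ∃ u : Nat, c ∈ pvL s0 u := by
  constructor
  · intro h
    simp only [PySem.Dict.keys, List.mem_map] at h
    obtain ⟨⟨c', v⟩, hm, he⟩ := h
    cases he
    obtain ⟨u, hu, -⟩ := (pvBfs_mem_items s0 c' v).mp hm
    exact ⟨u, hu⟩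
  · rintro ⟨u, hu⟩
    have hm : (c, (u : Int)) ∈ (pvBfs s0).items := (pvBfs_mem_items s0 c _).mpr ⟨u, hu, rfl⟩
    simp only [PySem.Dict.keys, List.mem_map]
    exact ⟨(c, (u : Int)), hm, rfl⟩

theorem pvBfs_getD (s0 : Int × Int) (c : Int × Int) (u : Nat) (h : c ∈ pvL s0 u) :
    (pvBfs s0).getD c 0 = (u : Int) := by
  have hm : (c, (u : Int)) ∈ (pvBfs s0).items := (pvBfs_mem_items s0 c _).mpr ⟨u, h, rfl⟩
  exact PySem.Dict.getD_of_mem_items _ hm (pvBfs_keys_nodup s0) 0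

theorem pvBfs_contains (s0 : Int × Int) (c : Int × Int) :
    (pvBfs s0).contains c = true ↔ ∃ u : Nat, c ∈ pvL s0 u := by
  rw [PySem.Dict.contains_iff_mem_keys]
  exact pvBfs_mem_keys s0 c

-- ===== B-side: port loop walks the same levels =====

theorem pvExpand_eq (F : List (Int × Int)) (seen : PySem.Set (Int × Int)) :
    pvExpand F seen = pvLevel F seen := by
  unfold pvExpand pvLevel
  rw [show pvMOVESB = pvMOVES from rfl]
  apply List.foldl_ext
  intro acc p _
  apply List.foldl_ext
  intro acc2 m _
  by_cases hmem : (p.1 + m.1, p.2 + m.2) ∈ acc2.2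
  · have hct : PySem.Set.contains acc2.2 (p.1 + m.1, p.2 + m.2) = true :=
      (PySem.Set.contains_iff _ _).mpr hmem
    rw [if_neg (by simp [hmem]), pvGstep, if_neg (by simp [hmem])]
  · have hcf : PySem.Set.contains acc2.2 (p.1 + m.1, p.2 + m.2) = false := by
      cases hcc : PySem.Set.contains acc2.2 (p.1 + m.1, p.2 + m.2)
      · rfl
      · exact absurd ((PySem.Set.contains_iff _ _).mp hcc) hmem
    by_cases hb : 0 ≤ p.1 + m.1 ∧ p.1 + m.1 < 8 ∧ 0 ≤ p.2 + m.2 ∧ p.2 + m.2 < 8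
    · rw [if_pos ⟨hb.1, hb.2.1, hb.2.2.1, hb.2.2.2, hcf⟩, pvGstep,
        if_pos ⟨hb.1, hb.2.1, hb.2.2.1, hb.2.2.2, hmem⟩,
        PySem.Set.add_of_not_mem hmem]
    · rw [if_neg (by tauto), pvGstep, if_neg (by tauto)]

theorem pvAltLoop_eq_meet (s1 s2 : Int × Int) (u0 : Nat) (hm : pvMeet s1 s2 u0)
    (hleast : ∀ v, v < u0 → ¬ pvMeet s1 s2 v) : ∀ (fuel t : Nat),
    66 ≤ fuel + t → t ≤ u0 →
    (∀ u, u < t → pvL s1 u ≠ [] ∧ pvL s2 u ≠ []) →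
    pvAltLoop fuel (pvL s1 t) (pvL s2 t) (pvK s1 t) (pvK s2 t) (t : Int) = (u0 : Int) := by
  intro fuel
  induction fuel with
  | zero =>
    intro t hft htu hne
    have := pvT_le s1 t (fun u hu => (hne u hu).1)
    omega
  | succ fuel ih =>
    intro t hft htu hne
    obtain ⟨c, hc1, hc2⟩ := hm
    have hL1 : pvL s1 t ≠ [] := by
      intro he
      have := pvL_empty_ge s1 he u0 htu
      rw [this] at hc1
      simp at hc1
    have hL2 : pvL s2 t ≠ [] := by
      intro he
      have := pvL_empty_ge s2 he u0 htu
      rw [this] at hc2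
      simp at hc2
    rw [show pvAltLoop (fuel+1) (pvL s1 t) (pvL s2 t) (pvK s1 t) (pvK s2 t) (t : Int)
        = if pvL s1 t = [] ∨ pvL s2 t = [] then -1
          else if PySem.Set.inter (PySem.Set.ofList (pvL s1 t)) (PySem.Set.ofList (pvL s2 t)) ≠ [] then (t : Int)
          else pvAltLoop fuel (pvExpand (pvL s1 t) (pvK s1 t)).1 (pvExpand (pvL s2 t) (pvK s2 t)).1
            (pvExpand (pvL s1 t) (pvK s1 t)).2 (pvExpand (pvL s2 t) (pvK s2 t)).2 ((t : Int) + 1) from rfl]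
    rw [if_neg (by tauto)]
    by_cases htu0 : t = u0
    · subst htu0
      have hint : PySem.Set.inter (PySem.Set.ofList (pvL s1 t)) (PySem.Set.ofList (pvL s2 t)) ≠ [] := by
        apply List.ne_nil_of_mem (a := c)
        rw [PySem.Set.mem_inter]
        exact ⟨(PySem.Set.mem_ofList _ _).mpr hc1, (PySem.Set.mem_ofList _ _).mpr hc2⟩
      rw [if_pos hint]
    · have hlt : t < u0 := by omega
      have hnint : ¬ (PySem.Set.inter (PySem.Set.ofList (pvL s1 t)) (PySem.Set.ofList (pvL s2 t)) ≠ []) := by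
        intro hne'
        obtain ⟨x, hx⟩ := List.exists_mem_of_ne_nil _ hne'
        rw [PySem.Set.mem_inter] at hx
        exact hleast t hlt ⟨x, (PySem.Set.mem_ofList _ _).mp hx.1, (PySem.Set.mem_ofList _ _).mp hx.2⟩
      rw [if_neg hnint]
      rw [pvExpand_eq, pvExpand_eq]
      have e11 : (pvLevel (pvL s1 t) (pvK s1 t)).1 = pvL s1 (t+1) := rfl
      have e12 : (pvLevel (pvL s1 t) (pvK s1 t)).2 = pvK s1 (t+1) := rfl
      have e21 : (pvLevel (pvL s2 t) (pvK s2 t)).1 = pvL s2 (t+1) := rfl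
      have e22 : (pvLevel (pvL s2 t) (pvK s2 t)).2 = pvK s2 (t+1) := rfl
      rw [e11, e12, e21, e22]
      have hcast : (t : Int) + 1 = ((t+1 : Nat) : Int) := by push_cast; ring
      rw [hcast]
      apply ih (t+1) (by omega) (by omega)
      intro u hu
      rcases Nat.lt_or_ge u t with h | h
      · exact hne u h
      · have : u = t := by omega
        subst this
        exact ⟨hL1, hL2⟩

theorem pvAltLoop_eq_nomeet (s1 s2 : Int × Int) (hm : ∀ u, ¬ pvMeet s1 s2 u) : ∀ (fuel t : Nat),
    66 ≤ fuel + t →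
    (∀ u, u < t → pvL s1 u ≠ [] ∧ pvL s2 u ≠ []) →
    pvAltLoop fuel (pvL s1 t) (pvL s2 t) (pvK s1 t) (pvK s2 t) (t : Int) = -1 := by
  intro fuel
  induction fuel with
  | zero =>
    intro t hft hne
    have := pvT_le s1 t (fun u hu => (hne u hu).1)
    omega
  | succ fuel ih =>
    intro t hft hne
    rw [show pvAltLoop (fuel+1) (pvL s1 t) (pvL s2 t) (pvK s1 t) (pvK s2 t) (t : Int)
        = if pvL s1 t = [] ∨ pvL s2 t = [] then -1
          else if PySem.Set.inter (PySem.Set.ofList (pvL s1 t)) (PySem.Set.ofList (pvL s2 t)) ≠ [] then (t : Int)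
          else pvAltLoop fuel (pvExpand (pvL s1 t) (pvK s1 t)).1 (pvExpand (pvL s2 t) (pvK s2 t)).1
            (pvExpand (pvL s1 t) (pvK s1 t)).2 (pvExpand (pvL s2 t) (pvK s2 t)).2 ((t : Int) + 1) from rfl]
    by_cases hL : pvL s1 t = [] ∨ pvL s2 t = []
    · rw [if_pos hL]
    · rw [if_neg hL]
      have hnint : ¬ (PySem.Set.inter (PySem.Set.ofList (pvL s1 t)) (PySem.Set.ofList (pvL s2 t)) ≠ []) := by
        intro hne'
        obtain ⟨x, hx⟩ := List.exists_mem_of_ne_nil _ hne'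
        rw [PySem.Set.mem_inter] at hx
        exact hm t ⟨x, (PySem.Set.mem_ofList _ _).mp hx.1, (PySem.Set.mem_ofList _ _).mp hx.2⟩
      rw [if_neg hnint]
      rw [pvExpand_eq, pvExpand_eq]
      have e11 : (pvLevel (pvL s1 t) (pvK s1 t)).1 = pvL s1 (t+1) := rfl
      have e12 : (pvLevel (pvL s1 t) (pvK s1 t)).2 = pvK s1 (t+1) := rfl
      have e21 : (pvLevel (pvL s2 t) (pvK s2 t)).1 = pvL s2 (t+1) := rfl
      have e22 : (pvLevel (pvL s2 t) (pvK s2 t)).2 = pvK s2 (t+1) := rfl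
      rw [e11, e12, e21, e22]
      have hcast : (t : Int) + 1 = ((t+1 : Nat) : Int) := by push_cast; ring
      rw [hcast]
      apply ih (t+1) (by omega)
      intro u hu
      rcases Nat.lt_or_ge u t with h | h
      · exact hne u h
      · have heq : u = t := by omega
        subst heq
        constructor
        · intro he; exact hL (Or.inl he)
        · intro he; exact hL (Or.inr he)

theorem pvAlt_eq_meet (s1 s2 : Int × Int) (u0 : Nat) (hm : pvMeet s1 s2 u0)
    (hleast : ∀ v, v < u0 → ¬ pvMeet s1 s2 v) :
    min_meeting_steps_alt s1 s2 = (u0 : Int) := by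
  have h1 : PySem.Set.ofList [s1] = [s1] :=
    PySem.Set.ofList_eq_self_of_nodup [s1] (List.nodup_singleton s1)
  have h2 : PySem.Set.ofList [s2] = [s2] :=
    PySem.Set.ofList_eq_self_of_nodup [s2] (List.nodup_singleton s2)
  show pvAltLoop 100000 [s1] [s2] (PySem.Set.ofList [s1]) (PySem.Set.ofList [s2]) 0 = (u0 : Int)
  rw [h1, h2]
  have := pvAltLoop_eq_meet s1 s2 u0 hm hleast 100000 0 (by omega) (by omega) (by omega)
  simpa [pvL, pvK, pvLK] using this

theorem pvAlt_eq_nomeet (s1 s2 : Int × Int) (hm : ∀ u, ¬ pvMeet s1 s2 u) :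
    min_meeting_steps_alt s1 s2 = -1 := by
  have h1 : PySem.Set.ofList [s1] = [s1] :=
    PySem.Set.ofList_eq_self_of_nodup [s1] (List.nodup_singleton s1)
  have h2 : PySem.Set.ofList [s2] = [s2] :=
    PySem.Set.ofList_eq_self_of_nodup [s2] (List.nodup_singleton s2)
  show pvAltLoop 100000 [s1] [s2] (PySem.Set.ofList [s1]) (PySem.Set.ofList [s2]) 0 = -1
  rw [h1, h2]
  have := pvAltLoop_eq_nomeet s1 s2 hm 100000 0 (by omega) (by omega)
  simpa [pvL, pvK, pvLK] using this

-- ===== the scan over dist1 computes the least meeting level =====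

def pvScanStep (f : (Int × Int) → Bool) (g : (Int × Int) → Int)
    (ms : Option Int) (pos : Int × Int) : Option Int :=
  if f pos then some (match ms with | none => g pos | some m => min m (g pos)) else ms

theorem pvScan_some (f : (Int × Int) → Bool) (g : (Int × Int) → Int) :
    ∀ (ks : List (Int × Int)) (a : Int), ∃ m, ks.foldl (pvScanStep f g) (some a) = some m := by
  intro ks
  induction ks with
  | nil => intro a; exact ⟨a, rfl⟩
  | cons k ks ih =>
    intro a
    rw [List.foldl_cons]
    by_cases h : f k = true
    · have : pvScanStep f g (some a) k = some (min a (g k)) := by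
        simp [pvScanStep, h]
      rw [this]; exact ih _
    · have : pvScanStep f g (some a) k = some a := by
        simp [pvScanStep, h]
      rw [this]; exact ih _

theorem pvScan_none (f : (Int × Int) → Bool) (g : (Int × Int) → Int) :
    ∀ (ks : List (Int × Int)), (ks.foldl (pvScanStep f g) none = none ↔ ∀ pos ∈ ks, f pos = false) := by
  intro ks
  induction ks with
  | nil => simp
  | cons k ks ih =>
    rw [List.foldl_cons]
    by_cases h : f k = true
    · have hstep : pvScanStep f g none k = some (g k) := by simp [pvScanStep, h]
      rw [hstep]
      obtain ⟨m, hm⟩ := pvScan_some f g ks (g k)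
      rw [hm]
      simp only [reduceCtorEq, false_iff]
      intro hall
      rw [hall k List.mem_cons_self] at h
      exact Bool.noConfusion h
    · have hstep : pvScanStep f g none k = none := by simp [pvScanStep, h]
      rw [hstep, ih]
      constructor
      · intro hall pos hpos
        rcases List.mem_cons.mp hpos with hh | hh
        · subst hh
          exact Bool.eq_false_iff.mpr h
        · exact hall pos hh
      · intro hall pos hpos
        exact hall pos (List.mem_cons.mpr (Or.inr hpos))

theorem pvScan_le (f : (Int × Int) → Bool) (g : (Int × Int) → Int) :
    ∀ (ks : List (Int × Int)) (acc : Option Int) (m : Int),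
      ks.foldl (pvScanStep f g) acc = some m →
      (∀ pos ∈ ks, f pos = true → m ≤ g pos) ∧ (∀ a, acc = some a → m ≤ a) := by
  intro ks
  induction ks with
  | nil =>
    intro acc m h
    refine ⟨by simp, ?_⟩
    intro a ha
    rw [ha] at h
    simp only [List.foldl_nil] at h
    cases h
    exact le_refl _
  | cons k ks ih =>
    intro acc m h
    rw [List.foldl_cons] at h
    obtain ⟨ih1, ih2⟩ := ih (pvScanStep f g acc k) m h
    constructor
    · intro pos hpos hf
      rcases List.mem_cons.mp hpos with hh | hh
      · subst hh
        cases acc with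
        | none =>
          have : pvScanStep f g none pos = some (g pos) := by simp [pvScanStep, hf]
          exact ih2 _ this
        | some a =>
          have : pvScanStep f g (some a) pos = some (min a (g pos)) := by simp [pvScanStep, hf]
          exact le_trans (ih2 _ this) (min_le_right _ _)
      · exact ih1 pos hh hf
    · intro a ha
      subst ha
      by_cases hf : f k = true
      · have : pvScanStep f g (some a) k = some (min a (g k)) := by simp [pvScanStep, hf]
        exact le_trans (ih2 _ this) (min_le_left _ _)
      · have : pvScanStep f g (some a) k = some a := by simp [pvScanStep, hf]
        exact ih2 _ this

theorem pvScan_mem (f : (Int × Int) → Bool) (g : (Int × Int) → Int) :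
    ∀ (ks : List (Int × Int)) (acc : Option Int) (m : Int),
      ks.foldl (pvScanStep f g) acc = some m →
      acc = some m ∨ ∃ pos ∈ ks, f pos = true ∧ g pos = m := by
  intro ks
  induction ks with
  | nil =>
    intro acc m h
    simp only [List.foldl_nil] at h
    exact Or.inl h
  | cons k ks ih =>
    intro acc m h
    rw [List.foldl_cons] at h
    rcases ih _ m h with hstep | ⟨pos, hpos, hf, hg⟩
    · by_cases hf : f k = true
      · cases acc with
        | none =>
          have he : pvScanStep f g none k = some (g k) := by simp [pvScanStep, hf]
          rw [he] at hstep
          cases hstep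
          exact Or.inr ⟨k, List.mem_cons_self, hf, rfl⟩
        | some a =>
          have he : pvScanStep f g (some a) k = some (min a (g k)) := by simp [pvScanStep, hf]
          rw [he] at hstep
          cases hstep
          rcases min_choice a (g k) with hc | hc
          · exact Or.inl (by rw [hc])
          · exact Or.inr ⟨k, List.mem_cons_self, hf, hc.symm⟩
      · have he : pvScanStep f g acc k = acc := by simp [pvScanStep, hf]
        rw [he] at hstep
        exact Or.inl hstep
    · exact Or.inr ⟨pos, List.mem_cons.mpr (Or.inr hpos), hf, hg⟩

-- ===== VERDICT (by name: the statement is the Claim_ definition above) =====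
theorem min_meeting_steps_spec : Claim_equal_min_meeting_steps := by
  intro s1 s2 _
  unfold Spec_min_meeting_steps
  classical
  show (match (pvBfs s1).keys.foldl (fun (ms : Option Int) (pos : Int × Int) =>
      if (pvBfs s2).contains pos = true then
        if (pvBfs s1).getD pos 0 = (pvBfs s2).getD pos 0 then
          some (match ms with
            | none => max ((pvBfs s1).getD pos 0) ((pvBfs s2).getD pos 0)
            | some m => min m (max ((pvBfs s1).getD pos 0) ((pvBfs s2).getD pos 0)))
        else ms
      else ms) none with
    | some m => m
    | none => -1) = min_meeting_steps_alt s1 s2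
  have hfun : (fun (ms : Option Int) (pos : Int × Int) =>
      if (pvBfs s2).contains pos = true then
        if (pvBfs s1).getD pos 0 = (pvBfs s2).getD pos 0 then
          some (match ms with
            | none => max ((pvBfs s1).getD pos 0) ((pvBfs s2).getD pos 0)
            | some m => min m (max ((pvBfs s1).getD pos 0) ((pvBfs s2).getD pos 0)))
        else ms
      else ms)
      = pvScanStep
          (fun pos => (pvBfs s2).contains pos && ((pvBfs s1).getD pos 0 == (pvBfs s2).getD pos 0))
          (fun pos => (pvBfs s1).getD pos 0) := by
    funext ms pos
    by_cases h1 : (pvBfs s2).contains pos = true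
    · by_cases h2 : (pvBfs s1).getD pos 0 = (pvBfs s2).getD pos 0
      · simp [pvScanStep, h1, h2]
      · simp [pvScanStep, h1, h2]
    · simp [pvScanStep, h1]
  rw [hfun]
  set Fb : (Int × Int) → Bool :=
    fun pos => (pvBfs s2).contains pos && ((pvBfs s1).getD pos 0 == (pvBfs s2).getD pos 0)
    with hFb
  set Gb : (Int × Int) → Int := fun pos => (pvBfs s1).getD pos 0 with hGb
  by_cases hmeet : ∃ u : Nat, pvMeet s1 s2 u
  · haveI : DecidablePred fun u : Nat => pvMeet s1 s2 u := fun u => Classical.dec _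
    obtain ⟨u0, hm0, hleast⟩ : ∃ u0, pvMeet s1 s2 u0 ∧ ∀ v, v < u0 → ¬ pvMeet s1 s2 v :=
      ⟨Nat.find hmeet, Nat.find_spec hmeet, fun v hv => Nat.find_min hmeet hv⟩
    rw [pvAlt_eq_meet s1 s2 u0 hm0 hleast]
    obtain ⟨c, hc1, hc2⟩ := hm0
    have hck : c ∈ (pvBfs s1).keys := (pvBfs_mem_keys s1 c).mpr ⟨u0, hc1⟩
    have hg1 : (pvBfs s1).getD c 0 = (u0 : Int) := pvBfs_getD s1 c u0 hc1
    have hg2 : (pvBfs s2).getD c 0 = (u0 : Int) := pvBfs_getD s2 c u0 hc2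
    have hfc : Fb c = true := by
      have hcont := (pvBfs_contains s2 c).mpr ⟨u0, hc2⟩
      rw [hFb]
      simp only [hcont, hg1, hg2, Bool.true_and]
      simp
    cases hfold : (pvBfs s1).keys.foldl (pvScanStep Fb Gb) none with
    | none =>
      exfalso
      have := (pvScan_none Fb Gb _).mp hfold c hck
      rw [hfc] at this
      exact Bool.noConfusion this
    | some m =>
      show m = (u0 : Int)
      have hle : m ≤ (u0 : Int) := by
        have h := (pvScan_le Fb Gb _ none m hfold).1 c hck hfc
        rw [hGb] at h
        simpa [hg1] using h
      have hge : (u0 : Int) ≤ m := by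
        rcases pvScan_mem Fb Gb _ none m hfold with hnone | ⟨pos, hpos, hf, hgm⟩
        · exact absurd hnone (by simp)
        · obtain ⟨t1, ht1⟩ := (pvBfs_mem_keys s1 pos).mp hpos
          rw [hFb] at hf
          have hb : (pvBfs s2).contains pos = true ∧
              (((pvBfs s1).getD pos 0 == (pvBfs s2).getD pos 0) = true) := by simpa using hf
          obtain ⟨t2, ht2⟩ := (pvBfs_contains s2 pos).mp hb.1
          have he1 : (pvBfs s1).getD pos 0 = (t1 : Int) := pvBfs_getD s1 pos t1 ht1
          have he2 : (pvBfs s2).getD pos 0 = (t2 : Int) := pvBfs_getD s2 pos t2 ht2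
          have ht12 : t1 = t2 := by
            have h := eq_of_beq hb.2
            rw [he1, he2] at h
            exact_mod_cast h
          have hmeet1 : pvMeet s1 s2 t1 := ⟨pos, ht1, ht12 ▸ ht2⟩
          have hu0le : u0 ≤ t1 := by
            by_contra hlt
            exact hleast t1 (by omega) hmeet1
          have hmt : m = (t1 : Int) := by
            rw [hGb] at hgm
            simp only at hgm
            rw [← hgm, he1]
          rw [hmt]
          exact_mod_cast hu0le
      exact le_antisymm hle hge
  · rw [pvAlt_eq_nomeet s1 s2 (fun u hu => hmeet ⟨u, hu⟩)]
    have hnone : (pvBfs s1).keys.foldl (pvScanStep Fb Gb) none = none := by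
      rw [pvScan_none]
      intro pos hpos
      by_cases hf : Fb pos = true
      · exfalso
        obtain ⟨t1, ht1⟩ := (pvBfs_mem_keys s1 pos).mp hpos
        rw [hFb] at hf
        have hb : (pvBfs s2).contains pos = true ∧
            (((pvBfs s1).getD pos 0 == (pvBfs s2).getD pos 0) = true) := by simpa using hf
        obtain ⟨t2, ht2⟩ := (pvBfs_contains s2 pos).mp hb.1
        have he1 : (pvBfs s1).getD pos 0 = (t1 : Int) := pvBfs_getD s1 pos t1 ht1
        have he2 : (pvBfs s2).getD pos 0 = (t2 : Int) := pvBfs_getD s2 pos t2 ht2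
        have ht12 : t1 = t2 := by
          have h := eq_of_beq hb.2
          rw [he1, he2] at h
          exact_mod_cast h
        exact hmeet ⟨t1, pos, ht1, ht12 ▸ ht2⟩
      · exact Bool.eq_false_iff.mpr hf
    rw [hnone]
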